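-- pv_equiv track=rewrite | github.com/bzyan-dcorg/Community_Safety_App | backend/services/rewards.py | determine_membership_tier
-- ===== SOURCE A (Python) =====
-- from typing import Dict, List, Optional, Tuple
--
-- TIER_LADDER: List[Tuple[str, int]] = [
--     ("Neighbor Scout", 0),
--     ("Signal Verified", 50),
--     ("Community Sentinel", 120),
--     ("Civic Guardian", 250),
-- ]
--
-- def determine_membership_tier(points: Optional[int]) -> str:
--     """Return the tier label that corresponds to the provided point balance."""
--     safe_points = int(points or 0)
--     tier = TIER_LADDER[0][0]
--     for name, threshold in TIER_LADDER:
--         if safe_points >= threshold: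
--             tier = name
--         else:
--             break
--     return tier
-- ===== SOURCE B (Python) =====
-- import bisect
--
-- TIER_LADDER = [
--     ("Neighbor Scout", 0),
--     ("Signal Verified", 50),
--     ("Community Sentinel", 120),
--     ("Civic Guardian", 250),
-- ]
--
-- _THRESHOLDS = [thr for _, thr in TIER_LADDER]
--
-- def determine_membership_tier(points):
--     safe_points = int(points or 0)
--     idx = bisect.bisect_right(_THRESHOLDS, safe_points) - 1
--     idx = max(idx, 0)
--     return TIER_LADDER[idx][0]
-- ===== Notes on version B (the rewrite author's own statement) =====
-- stated objective: idiomatic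
-- what changed: Replaced the sequential accumulate-and-break scan over TIER_LADDER with a bisect_right binary search on the extracted threshold list, clamping the index at 0 before looking up the tier name.
import Mathlib
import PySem

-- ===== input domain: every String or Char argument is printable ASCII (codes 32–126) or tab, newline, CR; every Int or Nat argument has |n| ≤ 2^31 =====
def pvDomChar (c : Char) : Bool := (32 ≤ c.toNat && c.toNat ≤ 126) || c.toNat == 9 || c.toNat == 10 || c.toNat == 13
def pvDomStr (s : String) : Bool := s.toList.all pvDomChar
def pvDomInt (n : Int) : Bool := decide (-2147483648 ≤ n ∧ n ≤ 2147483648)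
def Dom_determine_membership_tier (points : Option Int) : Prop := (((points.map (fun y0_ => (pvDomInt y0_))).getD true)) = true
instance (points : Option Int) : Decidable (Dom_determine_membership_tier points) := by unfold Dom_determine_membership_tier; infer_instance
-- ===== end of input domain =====

-- B replaces A's sequential accumulate-and-break scan of the ladder with a binary-search
-- (bisect_right) index into the threshold list, clamped at 0 (objective: idiomatic).

-- ===== PORT A =====
def TIER_LADDER : List (String × Int) :=
  [("Neighbor Scout", 0), ("Signal Verified", 50), ("Community Sentinel", 120), ("Civic Guardian", 250)]

-- the for-loop with `break`, as structural recursion over the ladder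
def pvLoopA : List (String × Int) → Int → String → String
  | [], _, tier => tier
  | (name, threshold) :: rest, sp, tier =>
    if sp ≥ threshold then pvLoopA rest sp name else tier

def determine_membership_tier (points : Option Int) : String :=
  -- `int(points or 0)`: None and 0 are falsy, int() is identity on ints
  let safe_points : Int := match points with
    | none => 0
    | some n => if n = 0 then 0 else n
  let tier := "Neighbor Scout"   -- TIER_LADDER[0][0]
  pvLoopA TIER_LADDER safe_points tier

-- ===== PORT B =====
-- bisect.bisect_right, transliterated (lo/hi binary search; the while-loop runs at most
-- xs.length iterations since hi - lo strictly shrinks, so xs.length fuel makes it structural)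
def pvBisectRight (xs : List Int) (x : Int) : Nat → Nat → Nat → Nat
  | 0, lo, _ => lo
  | fuel + 1, lo, hi =>
    if lo < hi then
      let mid := (lo + hi) / 2
      if x < xs.getD mid 0 then pvBisectRight xs x fuel lo mid
      else pvBisectRight xs x fuel (mid + 1) hi
    else lo

def pvThresholds : List Int := TIER_LADDER.map Prod.snd

def determine_membership_tier_alt (points : Option Int) : String :=
  let safe_points : Int := match points with
    | none => 0
    | some n => if n = 0 then 0 else n
  let idx : Int := (pvBisectRight pvThresholds safe_points pvThresholds.length 0 pvThresholds.length : Int) - 1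
  let idx := max idx 0
  (TIER_LADDER.getD idx.toNat ("", 0)).1

-- ===== PRECONDITION & SPEC =====
def Spec_determine_membership_tier (points : Option Int) (out : String) : Prop := out = determine_membership_tier_alt points
instance (points : Option Int) (out : String) : Decidable (Spec_determine_membership_tier points out) := by unfold Spec_determine_membership_tier; infer_instance

-- ===== CLAIM (what is proved, stated in full; the proofs are below) =====
def Claim_equal_determine_membership_tier : Prop := ∀ (points : Option Int), Dom_determine_membership_tier points → Spec_determine_membership_tier points (determine_membership_tier points)

-- ===== LEMMAS AND PROOFS =====

-- the common closed form both ports compute, as a function of the cleaned balance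
def pvTierOf (sp : Int) : String :=
  if sp ≥ 250 then "Civic Guardian"
  else if sp ≥ 120 then "Community Sentinel"
  else if sp ≥ 50 then "Signal Verified"
  else "Neighbor Scout"

theorem pvA_eq (sp : Int) : pvLoopA TIER_LADDER sp "Neighbor Scout" = pvTierOf sp := by
  simp only [TIER_LADDER, pvLoopA, pvTierOf]
  split_ifs <;> simp_all <;> omega

theorem pvB_eq (sp : Int) :
    (TIER_LADDER.getD (max ((pvBisectRight pvThresholds sp pvThresholds.length 0 pvThresholds.length : Int) - 1) 0).toNat ("", 0)).1
      = pvTierOf sp := by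
  have h4 : pvThresholds.length = 4 := by decide
  rw [h4]
  by_cases h1 : (250:Int) ≤ sp
  · have e : pvBisectRight pvThresholds sp 4 0 4 = 4 := by
      simp [pvBisectRight, pvThresholds, TIER_LADDER,
        show ¬ sp < 120 by omega, show ¬ sp < 250 by omega]
    rw [e]; simp [pvTierOf, TIER_LADDER, show (250:Int) ≤ sp by omega]
  · by_cases h2 : (120:Int) ≤ sp
    · have e : pvBisectRight pvThresholds sp 4 0 4 = 3 := by
        simp [pvBisectRight, pvThresholds, TIER_LADDER,
          show ¬ sp < 120 by omega, show sp < 250 by omega]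
      rw [e]; simp [pvTierOf, TIER_LADDER, show ¬ (250:Int) ≤ sp by omega,
        show (120:Int) ≤ sp by omega]
    · by_cases h3 : (50:Int) ≤ sp
      · have e : pvBisectRight pvThresholds sp 4 0 4 = 2 := by
          simp [pvBisectRight, pvThresholds, TIER_LADDER,
            show sp < 120 by omega, show ¬ sp < 50 by omega]
        rw [e]; simp [pvTierOf, TIER_LADDER, show ¬ (250:Int) ≤ sp by omega,
          show ¬ (120:Int) ≤ sp by omega, show (50:Int) ≤ sp by omega]
      · by_cases h0 : (0:Int) ≤ sp
        · have e : pvBisectRight pvThresholds sp 4 0 4 = 1 := by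
            simp [pvBisectRight, pvThresholds, TIER_LADDER,
              show sp < 120 by omega, show sp < 50 by omega, show ¬ sp < 0 by omega]
          rw [e]; simp [pvTierOf, TIER_LADDER, show ¬ (250:Int) ≤ sp by omega,
            show ¬ (120:Int) ≤ sp by omega, show ¬ (50:Int) ≤ sp by omega]
        · have e : pvBisectRight pvThresholds sp 4 0 4 = 0 := by
            simp [pvBisectRight, pvThresholds, TIER_LADDER,
              show sp < 120 by omega, show sp < 50 by omega, show sp < 0 by omega]
          rw [e]; simp [pvTierOf, TIER_LADDER, show ¬ (250:Int) ≤ sp by omega,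
            show ¬ (120:Int) ≤ sp by omega, show ¬ (50:Int) ≤ sp by omega]

theorem determine_membership_tier_eq_alt (points : Option Int) :
    determine_membership_tier points = determine_membership_tier_alt points := by
  unfold determine_membership_tier determine_membership_tier_alt
  exact (pvA_eq _).trans (pvB_eq _).symm

-- ===== VERDICT (by name: the statement is the Claim_ definition above) =====
theorem determine_membership_tier_spec : Claim_equal_determine_membership_tier := by
  intro points _
  exact determine_membership_tier_eq_alt points
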